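-- pv_equiv track=rewrite | github.com/Arash-H-Jafarizadeh/2D_boundary_driven | source_code/basic_functions.py | circuit_edges
-- ===== SOURCE A (Python) =====
-- def circuit_edges(Nx, Ny):
--     edges = [ [] for _ in range(4)]
--     for row in range(Ny):
--         for col in range(Nx):
--             idx = row * Nx + col
--             if col < Nx - 1 and col % 2 == 0.0 :  #Connection to horizontal neighbors
--                 edges[0].append((idx, idx + 1))
--             if col < Nx - 1 and col % 2 == 1.0 :
--                 edges[1].append((idx, idx + 1))
--             if row < Ny - 1 and row % 2 == 0.0 :  #Connection to vertical neighbors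
--                 edges[2].append((idx, idx + Nx))
--             if row < Ny - 1 and row % 2 == 1.0 :
--                 edges[3].append((idx, idx + Nx))
--
--     return edges
-- ===== SOURCE B (Python) =====
-- def circuit_edges(Nx, Ny):
--     # Build each edge pattern once as a single-row template, then replicate it
--     # across rows by translating all indices by the row's base offset.
--     # Templates are only materialised when there is at least one row to fill.
--     def replicate(offsets, template):
--         return [(a + d, b + d) for d in offsets for a, b in template]
--     all_offsets  = [r * Nx for r in range(Ny)]
--     even_offsets = [r * Nx for r in range(0, Ny - 1, 2)]
--     odd_offsets  = [r * Nx for r in range(1, Ny - 1, 2)]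
--     h_even_t = [(c, c + 1) for c in range(0, Nx - 1, 2)] if all_offsets else []
--     h_odd_t  = [(c, c + 1) for c in range(1, Nx - 1, 2)] if all_offsets else []
--     v_t = [(c, c + Nx) for c in range(Nx)] if (even_offsets or odd_offsets) else []
--     return [
--         replicate(all_offsets, h_even_t),
--         replicate(all_offsets, h_odd_t),
--         replicate(even_offsets, v_t),
--         replicate(odd_offsets, v_t),
--     ]
-- ===== Notes on version B (the rewrite author's own statement) =====
-- stated objective: alternative
-- what changed: Instead of scanning every cell with four parity guards, B computes each edge pattern once for a single row (templates over columns) and then replicates the template across rows by translating it with precomputed row base offsets.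
import Mathlib
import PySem

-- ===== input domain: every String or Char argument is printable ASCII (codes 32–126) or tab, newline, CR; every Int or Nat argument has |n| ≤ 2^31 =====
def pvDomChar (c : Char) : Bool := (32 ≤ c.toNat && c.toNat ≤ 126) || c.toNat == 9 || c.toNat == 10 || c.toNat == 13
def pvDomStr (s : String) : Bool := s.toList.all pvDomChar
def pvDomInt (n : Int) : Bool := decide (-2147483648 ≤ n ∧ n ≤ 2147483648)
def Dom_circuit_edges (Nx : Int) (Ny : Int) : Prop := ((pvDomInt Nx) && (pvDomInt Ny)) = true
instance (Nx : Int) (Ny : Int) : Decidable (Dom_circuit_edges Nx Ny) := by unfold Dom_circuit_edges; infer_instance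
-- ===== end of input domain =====

-- B builds each edge pattern once as a single-row template and replicates it across rows by
-- translating indices with precomputed row offsets, instead of scanning every cell with four
-- parity guards (objective: alternative decomposition, same result).

-- ===== PORT A =====
def circuit_edges (Nx : Int) (Ny : Int) : List (List (Int × Int)) :=
  let edges := (PySem.List.pyRange 0 Ny 1).foldl (fun (e : List (Int × Int) × List (Int × Int) × List (Int × Int) × List (Int × Int)) row =>
    (PySem.List.pyRange 0 Nx 1).foldl (fun e col =>
      let idx := row * Nx + col
      let e0 := if col < Nx - 1 ∧ PySem.Int.mod col 2 = 0 then e.1 ++ [(idx, idx + 1)] else e.1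
      let e1 := if col < Nx - 1 ∧ PySem.Int.mod col 2 = 1 then e.2.1 ++ [(idx, idx + 1)] else e.2.1
      let e2 := if row < Ny - 1 ∧ PySem.Int.mod row 2 = 0 then e.2.2.1 ++ [(idx, idx + Nx)] else e.2.2.1
      let e3 := if row < Ny - 1 ∧ PySem.Int.mod row 2 = 1 then e.2.2.2 ++ [(idx, idx + Nx)] else e.2.2.2
      (e0, e1, e2, e3)) e) (([], [], [], []))
  [edges.1, edges.2.1, edges.2.2.1, edges.2.2.2]

-- ===== PORT B =====
-- shift: translate every pair of a template by an offset d
def pvShift (pairs : List (Int × Int)) (d : Int) : List (Int × Int) :=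
  pairs.map (fun p => (p.1 + d, p.2 + d))

def circuit_edges_alt (Nx : Int) (Ny : Int) : List (List (Int × Int)) :=
  let allOffs  := (PySem.List.pyRange 0 Ny 1).map (fun r => r * Nx)
  let evenOffs := (PySem.List.pyRange 0 (Ny - 1) 2).map (fun r => r * Nx)
  let oddOffs  := (PySem.List.pyRange 1 (Ny - 1) 2).map (fun r => r * Nx)
  -- templates materialised only when some row offset exists (matches Source B's guards)
  let hEvenT := if allOffs.isEmpty then [] else (PySem.List.pyRange 0 (Nx - 1) 2).map (fun c => (c, c + 1))
  let hOddT  := if allOffs.isEmpty then [] else (PySem.List.pyRange 1 (Nx - 1) 2).map (fun c => (c, c + 1))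
  let vT     := if evenOffs.isEmpty && oddOffs.isEmpty then [] else (PySem.List.pyRange 0 Nx 1).map (fun c => (c, c + Nx))
  [ allOffs.flatMap (fun d => pvShift hEvenT d),
    allOffs.flatMap (fun d => pvShift hOddT d),
    evenOffs.flatMap (fun d => pvShift vT d),
    oddOffs.flatMap (fun d => pvShift vT d) ]

-- ===== PRECONDITION & SPEC =====
def Spec_circuit_edges (Nx : Int) (Ny : Int) (out : List (List (Int × Int))) : Prop := out = circuit_edges_alt Nx Ny
instance (Nx : Int) (Ny : Int) (out : List (List (Int × Int))) : Decidable (Spec_circuit_edges Nx Ny out) := by unfold Spec_circuit_edges; infer_instance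

-- ===== CLAIM (what is proved, stated in full; the proofs are below) =====
def Claim_equal_circuit_edges : Prop := ∀ (Nx : Int) (Ny : Int), Dom_circuit_edges Nx Ny → Spec_circuit_edges Nx Ny (circuit_edges Nx Ny)

-- ===== LEMMAS AND PROOFS =====

lemma pmod2 (a : Int) : PySem.Int.mod a 2 = a % 2 :=
  PySem.Int.mod_eq_emod_of_pos (by norm_num)

lemma pyRange_two_nil (a b : Int) (h : b ≤ a) : PySem.List.pyRange a b 2 = [] := by
  rw [PySem.List.pyRange_of_pos a b (by norm_num)]
  simp [show ¬ a < b by omega]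

lemma pyRange_two_cons (a b : Int) (h : a < b) :
    PySem.List.pyRange a b 2 = a :: PySem.List.pyRange (a + 2) b 2 := by
  rw [PySem.List.pyRange_of_pos a b (by norm_num),
      PySem.List.pyRange_of_pos (a + 2) b (by norm_num)]
  by_cases h2 : a + 2 < b
  · rw [if_pos h, if_pos h2,
      show ((b - a + 2 - 1) / 2).toNat = ((b - (a + 2) + 2 - 1) / 2).toNat + 1 by omega,
      List.range_succ_eq_map]
    simp only [List.map_cons, List.map_map]
    congr 1
    · norm_num
    · apply List.map_congr_left
      intro k _
      simp only [Function.comp_apply, Nat.succ_eq_add_one]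
      push_cast
      ring
  · rw [if_pos h, if_neg h2, show ((b - a + 2 - 1) / 2).toNat = 1 by omega]
    have : PySem.List.pyRange (a + 2) b 2 = [] := pyRange_two_nil _ _ (by omega)
    rw [PySem.List.pyRange_of_pos (a + 2) b (by norm_num), if_neg h2] at this
    simp [List.range_succ]

lemma flatMap_single {α : Type} (l : List Int) (f : Int → α) :
    l.flatMap (fun x => [f x]) = l.map f := by
  induction l with
  | nil => simp
  | cons x t ih => simp [ih]

-- A's inner fold over the columns, one row: each of the four accumulators grows by a flatMap.
lemma innerA (Nx Ny row : Int) (l : List Int) (a b c d : List (Int × Int)) :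
    l.foldl (fun (e : List (Int × Int) × List (Int × Int) × List (Int × Int) × List (Int × Int)) col =>
      (if col < Nx - 1 ∧ PySem.Int.mod col 2 = 0 then e.1 ++ [(row * Nx + col, row * Nx + col + 1)] else e.1,
       if col < Nx - 1 ∧ PySem.Int.mod col 2 = 1 then e.2.1 ++ [(row * Nx + col, row * Nx + col + 1)] else e.2.1,
       if row < Ny - 1 ∧ PySem.Int.mod row 2 = 0 then e.2.2.1 ++ [(row * Nx + col, row * Nx + col + Nx)] else e.2.2.1,
       if row < Ny - 1 ∧ PySem.Int.mod row 2 = 1 then e.2.2.2 ++ [(row * Nx + col, row * Nx + col + Nx)] else e.2.2.2))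
      (a, b, c, d)
    = (a ++ l.flatMap (fun col => if col < Nx - 1 ∧ PySem.Int.mod col 2 = 0 then [(row * Nx + col, row * Nx + col + 1)] else []),
       b ++ l.flatMap (fun col => if col < Nx - 1 ∧ PySem.Int.mod col 2 = 1 then [(row * Nx + col, row * Nx + col + 1)] else []),
       c ++ l.flatMap (fun col => if row < Ny - 1 ∧ PySem.Int.mod row 2 = 0 then [(row * Nx + col, row * Nx + col + Nx)] else []),
       d ++ l.flatMap (fun col => if row < Ny - 1 ∧ PySem.Int.mod row 2 = 1 then [(row * Nx + col, row * Nx + col + Nx)] else [])) := by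
  induction l generalizing a b c d with
  | nil => simp
  | cons x t ih =>
    simp only [List.foldl_cons, List.flatMap_cons]
    rw [ih]
    split_ifs <;> simp

-- A's outer fold over the rows.
lemma outerA (Nx Ny : Int) (rows cols : List Int) (a b c d : List (Int × Int)) :
    rows.foldl (fun (e : List (Int × Int) × List (Int × Int) × List (Int × Int) × List (Int × Int)) row =>
      cols.foldl (fun e col =>
        (if col < Nx - 1 ∧ PySem.Int.mod col 2 = 0 then e.1 ++ [(row * Nx + col, row * Nx + col + 1)] else e.1,
         if col < Nx - 1 ∧ PySem.Int.mod col 2 = 1 then e.2.1 ++ [(row * Nx + col, row * Nx + col + 1)] else e.2.1,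
         if row < Ny - 1 ∧ PySem.Int.mod row 2 = 0 then e.2.2.1 ++ [(row * Nx + col, row * Nx + col + Nx)] else e.2.2.1,
         if row < Ny - 1 ∧ PySem.Int.mod row 2 = 1 then e.2.2.2 ++ [(row * Nx + col, row * Nx + col + Nx)] else e.2.2.2)) e)
      (a, b, c, d)
    = (a ++ rows.flatMap (fun row => cols.flatMap (fun col => if col < Nx - 1 ∧ PySem.Int.mod col 2 = 0 then [(row * Nx + col, row * Nx + col + 1)] else [])),
       b ++ rows.flatMap (fun row => cols.flatMap (fun col => if col < Nx - 1 ∧ PySem.Int.mod col 2 = 1 then [(row * Nx + col, row * Nx + col + 1)] else [])),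
       c ++ rows.flatMap (fun row => cols.flatMap (fun col => if row < Ny - 1 ∧ PySem.Int.mod row 2 = 0 then [(row * Nx + col, row * Nx + col + Nx)] else [])),
       d ++ rows.flatMap (fun row => cols.flatMap (fun col => if row < Ny - 1 ∧ PySem.Int.mod row 2 = 1 then [(row * Nx + col, row * Nx + col + Nx)] else []))) := by
  induction rows generalizing a b c d with
  | nil => simp
  | cons r t ih =>
    simp only [List.foldl_cons, List.flatMap_cons]
    rw [innerA, ih]
    simp [List.append_assoc]

-- One parity class of a step-1 range is the corresponding step-2 range.
lemma flatMap_pair {α : Type} (w : Int → List α) (t : Int) :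
    ∀ (n : Nat) (a M : Int), (M - a).toNat ≤ n → PySem.Int.mod a 2 = t →
    (PySem.List.pyRange a M 1).flatMap (fun c => if PySem.Int.mod c 2 = t then w c else [])
      = (PySem.List.pyRange a M 2).flatMap w := by
  intro n
  induction n with
  | zero =>
    intro a M hn _
    rw [PySem.List.pyRange_one_eq_nil (by omega), pyRange_two_nil a M (by omega)]
    simp
  | succ n ih =>
    intro a M hn hmatch
    by_cases hb : a < M
    · rw [PySem.List.pyRange_one_cons hb, pyRange_two_cons a M hb,
        List.flatMap_cons, List.flatMap_cons, if_pos hmatch]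
      congr 1
      by_cases h2 : a + 1 < M
      · rw [PySem.List.pyRange_one_cons h2, List.flatMap_cons]
        have hne : ¬ PySem.Int.mod (a + 1) 2 = t := by
          rw [pmod2] at *; omega
        rw [if_neg hne, List.nil_append, show a + 1 + 1 = a + 2 by ring]
        exact ih (a + 2) M (by omega) (by rw [pmod2] at *; omega)
      · rw [PySem.List.pyRange_one_eq_nil (by omega), pyRange_two_nil _ _ (by omega)]
        simp
    · rw [PySem.List.pyRange_one_eq_nil (by omega), pyRange_two_nil a M (by omega)]
      simp

lemma comp_even {α : Type} (w : Int → List α) (M : Int) :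
    (PySem.List.pyRange 0 M 1).flatMap (fun c => if PySem.Int.mod c 2 = 0 then w c else [])
      = (PySem.List.pyRange 0 M 2).flatMap w :=
  flatMap_pair w 0 (M - 0).toNat 0 M (by omega) (by rw [pmod2]; norm_num)

lemma comp_odd {α : Type} (w : Int → List α) (M : Int) :
    (PySem.List.pyRange 0 M 1).flatMap (fun c => if PySem.Int.mod c 2 = 1 then w c else [])
      = (PySem.List.pyRange 1 M 2).flatMap w := by
  by_cases h : 0 < M
  · rw [PySem.List.pyRange_one_cons h, List.flatMap_cons]
    have hne : ¬ PySem.Int.mod (0 : Int) 2 = 1 := by rw [pmod2]; omega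
    rw [if_neg hne, List.nil_append]
    exact flatMap_pair w 1 (M - 1).toNat 1 M (by omega) (by rw [pmod2]; norm_num)
  · rw [PySem.List.pyRange_one_eq_nil (by omega), pyRange_two_nil _ _ (by omega)]
    simp

-- dropping the 'c < N - 1' bound shortens the range by one.
lemma bound_drop {α : Type} (N : Int) (p : Int → Prop) [DecidablePred p] (w : Int → List α) :
    (PySem.List.pyRange 0 N 1).flatMap (fun c => if c < N - 1 ∧ p c then w c else [])
      = (PySem.List.pyRange 0 (N - 1) 1).flatMap (fun c => if p c then w c else []) := by
  by_cases h : 1 ≤ N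
  · rw [PySem.List.pyRange_one_append 0 (N - 1) N (by omega) (by omega), List.flatMap_append]
    have hsing : PySem.List.pyRange (N - 1) N 1 = [N - 1] := by
      have := PySem.List.pyRange_one_singleton (N - 1)
      simpa using this
    rw [hsing, List.flatMap_cons]
    have hlast : ¬ (N - 1 < N - 1 ∧ p (N - 1)) := by
      intro hc; exact absurd hc.1 (lt_irrefl _)
    rw [if_neg hlast]
    simp only [List.flatMap_nil, List.append_nil]
    apply List.flatMap_congr
    intro c hc
    have := (PySem.List.mem_pyRange_one.mp hc)
    rw [if_congr (and_iff_right_iff_imp.mpr (fun _ => this.2)) rfl rfl]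
  · rw [PySem.List.pyRange_one_eq_nil (by omega), PySem.List.pyRange_one_eq_nil (by omega)]
    simp

lemma flatMap_const_if {α : Type} (l : List Int) (P : Prop) [Decidable P] (g : Int → α) :
    l.flatMap (fun c => if P then [g c] else []) = if P then l.map g else [] := by
  split_ifs with h <;> simp [flatMap_single]

-- a template guarded by emptiness of the offset list it is replicated over can drop the guard.
lemma flatMap_guard (offs : List Int) (c : Bool) (T : List (Int × Int))
    (h : c = true → offs = []) :
    offs.flatMap (fun d => pvShift (if c then [] else T) d) = offs.flatMap (fun d => pvShift T d) := by
  cases c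
  · simp
  · simp [h rfl]

-- B's replicate-shifted-template over offsets r*Nx, unfolded to a flatMap over rows.
lemma shift_template (Nx : Int) (rs cs : List Int) (f g : Int → Int) :
    (rs.map (fun r => r * Nx)).flatMap (fun d => pvShift (cs.map (fun c => (f c, g c))) d)
      = rs.flatMap (fun r => cs.map (fun c => (f c + r * Nx, g c + r * Nx))) := by
  rw [List.flatMap_map]
  apply List.flatMap_congr
  intro r _
  simp [pvShift, List.map_map, Function.comp]

-- ===== VERDICT (by name: the statement is the Claim_ definition above) =====
theorem circuit_edges_spec : Claim_equal_circuit_edges := by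
  intro Nx Ny _
  unfold Spec_circuit_edges circuit_edges circuit_edges_alt
  dsimp only
  rw [outerA]
  dsimp only
  simp only [List.nil_append]
  rw [flatMap_guard _ _ _ (fun h => List.isEmpty_iff.mp h),
      flatMap_guard _ _ _ (fun h => List.isEmpty_iff.mp h),
      flatMap_guard _ _ _ (fun h => List.isEmpty_iff.mp (by simpa using (Bool.and_eq_true_iff.mp h).1)),
      flatMap_guard _ _ _ (fun h => List.isEmpty_iff.mp (by simpa using (Bool.and_eq_true_iff.mp h).2)),
      shift_template, shift_template, shift_template, shift_template]
  congr 1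
  · -- hEven
    apply List.flatMap_congr
    intro row _
    rw [bound_drop Nx (fun c => PySem.Int.mod c 2 = 0), comp_even, flatMap_single]
    apply List.map_congr_left
    intro c _
    simp only [Prod.mk.injEq]
    exact ⟨by ring, by ring⟩
  congr 1
  · -- hOdd
    apply List.flatMap_congr
    intro row _
    rw [bound_drop Nx (fun c => PySem.Int.mod c 2 = 1), comp_odd, flatMap_single]
    apply List.map_congr_left
    intro c _
    simp only [Prod.mk.injEq]
    exact ⟨by ring, by ring⟩
  congr 1
  · -- vEven
    have h1 : (PySem.List.pyRange 0 Ny 1).flatMap (fun row => (PySem.List.pyRange 0 Nx 1).flatMap (fun col => if row < Ny - 1 ∧ PySem.Int.mod row 2 = 0 then [(row * Nx + col, row * Nx + col + Nx)] else []))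
        = (PySem.List.pyRange 0 Ny 1).flatMap (fun row => if row < Ny - 1 ∧ PySem.Int.mod row 2 = 0 then (PySem.List.pyRange 0 Nx 1).map (fun col => (row * Nx + col, row * Nx + col + Nx)) else []) := by
      apply List.flatMap_congr
      intro row _
      exact flatMap_const_if _ _ _
    rw [h1, bound_drop Ny (fun r => PySem.Int.mod r 2 = 0), comp_even]
    apply List.flatMap_congr
    intro row _
    apply List.map_congr_left
    intro c _
    simp only [Prod.mk.injEq]
    exact ⟨by ring, by ring⟩
  · -- vOdd
    have h1 : (PySem.List.pyRange 0 Ny 1).flatMap (fun row => (PySem.List.pyRange 0 Nx 1).flatMap (fun col => if row < Ny - 1 ∧ PySem.Int.mod row 2 = 1 then [(row * Nx + col, row * Nx + col + Nx)] else []))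
        = (PySem.List.pyRange 0 Ny 1).flatMap (fun row => if row < Ny - 1 ∧ PySem.Int.mod row 2 = 1 then (PySem.List.pyRange 0 Nx 1).map (fun col => (row * Nx + col, row * Nx + col + Nx)) else []) := by
      apply List.flatMap_congr
      intro row _
      exact flatMap_const_if _ _ _
    rw [h1, bound_drop Ny (fun r => PySem.Int.mod r 2 = 1), comp_odd]
    congr 1
    apply List.flatMap_congr
    intro row _
    apply List.map_congr_left
    intro c _
    simp only [Prod.mk.injEq]
    exact ⟨by ring, by ring⟩
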